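-- pv_equiv track=rewrite | github.com/psh355q-ui/234sidufy435 | backend/automation/macro_context_updater.py | _assess_geopolitical_risk
-- ===== SOURCE A (Python) =====
-- from typing import Dict, Optional
--
-- def _assess_geopolitical_risk(market_data: Dict) -> str:
--     """
--     지정학적 리스크 평가
--
--     Returns:
--         'HIGH' | 'MEDIUM' | 'LOW'
--     """
--     events = market_data.get("geopolitical_events", [])
--
--     # 고위험 키워드
--     high_risk_keywords = ["war", "invasion", "nuclear", "embargo"]
--     medium_risk_keywords = ["tensions", "sanctions", "dispute"]
--
--     for event in events:
--         event_lower = event.lower()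
--         if any(keyword in event_lower for keyword in high_risk_keywords):
--             return "HIGH"
--
--     for event in events:
--         event_lower = event.lower()
--         if any(keyword in event_lower for keyword in medium_risk_keywords):
--             return "MEDIUM"
--
--     return "LOW"
-- ===== SOURCE B (Python) =====
-- def _assess_geopolitical_risk(market_data) -> str:
--     events = market_data.get("geopolitical_events", [])
--     high_risk_keywords = ["war", "invasion", "nuclear", "embargo"]
--     medium_risk_keywords = ["tensions", "sanctions", "dispute"]
--     found_medium = False
--     for event in events:
--         event_lower = event.lower()
--         if any(keyword in event_lower for keyword in high_risk_keywords):
--             return "HIGH"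
--         if not found_medium:
--             found_medium = any(keyword in event_lower for keyword in medium_risk_keywords)
--     return "MEDIUM" if found_medium else "LOW"
-- ===== Notes on version B (the rewrite author's own statement) =====
-- stated objective: alternative
-- what changed: Replaces A's two separate scans over the events (one for high-risk, one for medium-risk keywords) with a single pass that early-returns on a high-risk match and carries a found_medium flag to decide MEDIUM vs LOW after the loop.
import Mathlib
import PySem

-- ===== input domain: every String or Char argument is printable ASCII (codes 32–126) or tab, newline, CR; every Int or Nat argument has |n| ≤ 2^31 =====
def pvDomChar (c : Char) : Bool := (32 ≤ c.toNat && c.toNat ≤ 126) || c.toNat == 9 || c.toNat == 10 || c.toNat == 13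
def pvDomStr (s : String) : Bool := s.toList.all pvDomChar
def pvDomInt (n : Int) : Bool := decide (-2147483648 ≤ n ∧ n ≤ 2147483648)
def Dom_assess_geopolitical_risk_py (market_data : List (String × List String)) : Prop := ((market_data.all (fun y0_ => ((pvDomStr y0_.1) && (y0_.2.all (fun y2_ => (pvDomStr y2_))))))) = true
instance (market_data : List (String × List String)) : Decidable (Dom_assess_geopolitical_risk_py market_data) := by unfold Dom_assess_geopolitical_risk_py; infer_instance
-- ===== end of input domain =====

-- B replaces A's two scans over the events with a single pass carrying a found_medium
-- flag (early-returning on a high-risk match); alternative decomposition, same result.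


-- ===== PORT A =====
def pvHighKw : List String := ["war", "invasion", "nuclear", "embargo"]
def pvMedKw : List String := ["tensions", "sanctions", "dispute"]

-- first loop of A: 'for event in events: if any(high): return "HIGH"'
def pvLoopHigh : List String → Option String
  | [] => none
  | e :: rest =>
    let event_lower := PySem.Str.lower e
    if pvHighKw.any (fun k => PySem.Str.isIn k event_lower) then some "HIGH"
    else pvLoopHigh rest

-- second loop of A: 'for event in events: if any(medium): return "MEDIUM"'
def pvLoopMed : List String → Option String
  | [] => none
  | e :: rest =>
    let event_lower := PySem.Str.lower e
    if pvMedKw.any (fun k => PySem.Str.isIn k event_lower) then some "MEDIUM"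
    else pvLoopMed rest

def assess_geopolitical_risk_py (market_data : List (String × List String)) : String :=
  let events := (PySem.Dict.mk market_data).getD "geopolitical_events" []
  match pvLoopHigh events with
  | some r => r
  | none =>
    match pvLoopMed events with
    | some r => r
    | none => "LOW"

-- ===== PORT B =====
-- single pass with a found_medium flag; returns "HIGH" immediately on a high-risk match
def pvLoopB : List String → Bool → String
  | [], found_medium => if found_medium then "MEDIUM" else "LOW"
  | e :: rest, found_medium =>
    let event_lower := PySem.Str.lower e
    if pvHighKw.any (fun k => PySem.Str.isIn k event_lower) then "HIGH"
    else if found_medium then pvLoopB rest true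
    else pvLoopB rest (pvMedKw.any (fun k => PySem.Str.isIn k event_lower))

def assess_geopolitical_risk_py_alt (market_data : List (String × List String)) : String :=
  let events := (PySem.Dict.mk market_data).getD "geopolitical_events" []
  pvLoopB events false

-- ===== PRECONDITION & SPEC =====
def Spec_assess_geopolitical_risk_py (market_data : List (String × List String)) (out : String) : Prop := out = assess_geopolitical_risk_py_alt market_data
instance (market_data : List (String × List String)) (out : String) : Decidable (Spec_assess_geopolitical_risk_py market_data out) := by unfold Spec_assess_geopolitical_risk_py; infer_instance

-- ===== CLAIM (what is proved, stated in full; the proofs are below) =====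
def Claim_equal_assess_geopolitical_risk_py : Prop := ∀ (market_data : List (String × List String)), Dom_assess_geopolitical_risk_py market_data → Spec_assess_geopolitical_risk_py market_data (assess_geopolitical_risk_py market_data)

-- ===== LEMMAS AND PROOFS =====
-- B's single pass with flag equals A's two-loop composition, for any initial flag value.
theorem pvLoopB_eq (events : List String) (found : Bool) :
    pvLoopB events found =
      match pvLoopHigh events with
      | some r => r
      | none =>
        if found then "MEDIUM"
        else match pvLoopMed events with
          | some r => r
          | none => "LOW" := by
  induction events generalizing found with
  | nil => cases found <;> rfl
  | cons e rest ih =>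
    cases hh : pvHighKw.any (fun k => PySem.Str.isIn k (PySem.Str.lower e)) with
    | true => simp at hh; simp [pvLoopB, pvLoopHigh, hh]
    | false =>
      simp at hh
      cases found with
      | true =>
        simp [pvLoopB, pvLoopHigh, ih]
        split_ifs <;> simp
      | false =>
        cases hm : pvMedKw.any (fun k => PySem.Str.isIn k (PySem.Str.lower e)) with
        | true =>
          simp at hm
          simp [pvLoopB, pvLoopHigh, pvLoopMed, hm, ih]
          split_ifs <;> simp
        | false =>
          simp [pvLoopB, pvLoopHigh, pvLoopMed, ih]
          split_ifs <;> simp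

-- ===== VERDICT (by name: the statement is the Claim_ definition above) =====
theorem assess_geopolitical_risk_py_spec : Claim_equal_assess_geopolitical_risk_py := by
  intro market_data _
  unfold Spec_assess_geopolitical_risk_py assess_geopolitical_risk_py assess_geopolitical_risk_py_alt
  simp [pvLoopB_eq]
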